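-- pv_equiv track=rewrite | github.com/salvador-dali/algorithms_general | interview_bits/ninja/01/02_get-mode-array-updates.py | update
-- ===== SOURCE A (Python) =====
-- from collections import Counter
--
-- def update(arr, queries):
--     cnt = Counter(arr)
--
--     res = []
--     for i, v in queries:
--         prev = arr[i - 1]
--         cnt[prev] -= 1
--         cnt[v] += 1
--         arr[i - 1] = v
--         res.append(cnt.most_common(1))
--
--     return res
-- ===== SOURCE B (Python) =====
-- def _first_max(cnt):
--     # first key in dict order with maximal count (= Counter.most_common(1) semantics)
--     bk = bc = None
--     for k, c in cnt.items():
--         if bc is None or c > bc: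
--             bk, bc = k, c
--     return bk, bc
--
--
-- def update(arr, queries):
--     # Incremental mode tracking: keep the current mode as a candidate and only
--     # rescan the counts when the mode itself loses a count; like A, mutates arr.
--     cnt = {}
--     order = {}
--     for x in arr:
--         if x not in order:
--             order[x] = len(order)
--         cnt[x] = cnt.get(x, 0) + 1
--
--     bk, bc = _first_max(cnt)
--
--     res = []
--     for i, v in queries:
--         prev = arr[i - 1]
--         arr[i - 1] = v
--         if prev != v:
--             cnt[prev] -= 1
--             if v not in order:
--                 order[v] = len(order)
--             cv = cnt.get(v, 0) + 1
--             cnt[v] = cv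
--             if cv > bc or (cv == bc and order[v] < order[bk]):
--                 bk, bc = v, cv
--             elif prev == bk:
--                 bk, bc = _first_max(cnt)
--         res.append([(bk, bc)])
--     return res
-- ===== Notes on version B (the rewrite author's own statement) =====
-- stated objective: faster
-- what changed: A rebuilds most_common(1) by scanning the whole Counter after every query; B tracks the current mode (key, count, plus a first-insertion-order index per key) incrementally and only rescans the counts when the mode key itself loses a count, so most queries are O(1).
import Mathlib
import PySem

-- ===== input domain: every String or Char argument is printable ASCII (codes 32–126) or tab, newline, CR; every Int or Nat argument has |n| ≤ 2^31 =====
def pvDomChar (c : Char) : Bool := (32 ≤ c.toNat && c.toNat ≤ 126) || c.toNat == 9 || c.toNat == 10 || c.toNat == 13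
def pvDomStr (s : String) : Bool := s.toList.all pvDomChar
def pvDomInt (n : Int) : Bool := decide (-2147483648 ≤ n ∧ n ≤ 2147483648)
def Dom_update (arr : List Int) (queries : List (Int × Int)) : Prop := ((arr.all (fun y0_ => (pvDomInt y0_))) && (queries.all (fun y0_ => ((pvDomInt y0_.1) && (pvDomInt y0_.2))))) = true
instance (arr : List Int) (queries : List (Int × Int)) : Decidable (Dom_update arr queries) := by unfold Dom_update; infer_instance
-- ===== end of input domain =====

-- B replaces A's full most_common(1) scan per query by incremental tracking of the current mode
-- (rescanning only when the mode itself loses a count); both Pythons mutate `arr` in place —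
-- the equivalence proved here is about the return value.

-- ===== PORT A =====
-- shared helper: one step of the scan `if c > bc: bk, bc = k, c` (ties keep the earlier item),
-- which is exactly how Counter.most_common(1) (= heapq.nlargest(1) keyed on the count) breaks ties
def fmStep (b q : Int × Int) : Int × Int := if b.2 < q.2 then q else b

-- first item of the list with maximal second component ([] for an empty list)
def fmList (l : List (Int × Int)) : List (Int × Int) :=
  match l with
  | [] => []
  | p :: rest => [rest.foldl fmStep p]

-- cnt.most_common(1): exact — the first dict item with maximal count (or [] for an empty Counter)
def mostCommon1 (cnt : PySem.Dict Int Int) : List (Int × Int) := fmList cnt.items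

-- one iteration of A's `for i, v in queries` loop over the state (arr, cnt, res)
def updateStepA (st : List Int × PySem.Dict Int Int × List (List (Int × Int))) (q : Int × Int) :
    List Int × PySem.Dict Int Int × List (List (Int × Int)) :=
  let prev := PySem.List.pyGetD st.1 (q.1 - 1) 0          -- prev = arr[i - 1]
  let cnt1 := st.2.1.modify prev 0 (· - 1)                -- cnt[prev] -= 1  (Counter: missing = 0)
  let cnt2 := cnt1.modify q.2 0 (· + 1)                   -- cnt[v] += 1
  (PySem.List.pySetD st.1 (q.1 - 1) q.2,                  -- arr[i - 1] = v
   cnt2, st.2.2 ++ [mostCommon1 cnt2])                    -- res.append(cnt.most_common(1))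

def update (arr : List Int) (queries : List (Int × Int)) : List (List (Int × Int)) :=
  (queries.foldl updateStepA (arr, PySem.Dict.counter arr, [])).2.2

-- ===== PORT B =====
-- _first_max(cnt): scan with `if bc is None or c > bc`; (0, 0) stands for the Python (None, None)
-- of an empty dict, which under Pre_update never reaches the output (empty arr forces empty queries)
def firstMax (cnt : PySem.Dict Int Int) : Int × Int :=
  match cnt.items with
  | [] => (0, 0)
  | p :: rest => rest.foldl fmStep p

-- B's initialisation loop over arr building (cnt, order)
def altInit (arr : List Int) : PySem.Dict Int Int × PySem.Dict Int Int :=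
  arr.foldl (fun s x =>
      (s.1.insert x (s.1.getD x 0 + 1),
       if s.2.contains x then s.2 else s.2.insert x (s.2.size : Int)))
    (PySem.Dict.empty, PySem.Dict.empty)

-- one iteration of B's query loop over the state (arr, cnt, order, bk, bc, res)
def updateStepB
    (st : List Int × PySem.Dict Int Int × PySem.Dict Int Int × Int × Int × List (List (Int × Int)))
    (q : Int × Int) :
    List Int × PySem.Dict Int Int × PySem.Dict Int Int × Int × Int × List (List (Int × Int)) :=
  match st with
  | (a, cnt, ordd, bk, bc, res) =>
    let prev := PySem.List.pyGetD a (q.1 - 1) 0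
    let a1 := PySem.List.pySetD a (q.1 - 1) q.2
    if prev = q.2 then
      (a1, cnt, ordd, bk, bc, res ++ [[(bk, bc)]])
    else
      let cnt1 := cnt.insert prev (cnt.getD prev 0 - 1)                       -- cnt[prev] -= 1
      let ordd1 := if ordd.contains q.2 then ordd
                   else ordd.insert q.2 (ordd.size : Int)                     -- order[v] = len(order)
      let cv := cnt1.getD q.2 0 + 1                                           -- cv = cnt.get(v, 0) + 1
      let cnt2 := cnt1.insert q.2 cv                                          -- cnt[v] = cv
      if bc < cv ∨ (cv = bc ∧ ordd1.getD q.2 0 < ordd1.getD bk 0) then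
        (a1, cnt2, ordd1, q.2, cv, res ++ [[(q.2, cv)]])
      else if prev = bk then
        let nb := firstMax cnt2
        (a1, cnt2, ordd1, nb.1, nb.2, res ++ [[nb]])
      else
        (a1, cnt2, ordd1, bk, bc, res ++ [[(bk, bc)]])

def update_alt (arr : List Int) (queries : List (Int × Int)) : List (List (Int × Int)) :=
  let ic := altInit arr
  let b0 := firstMax ic.1
  (queries.foldl updateStepB (arr, ic.1, ic.2, b0.1, b0.2, [])).2.2.2.2.2

-- ===== PRECONDITION & SPEC =====
-- Pre_update: exactly the inputs where A returns — every query index i must make arr[i - 1]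
-- a valid (possibly negative) Python index, otherwise A raises IndexError; arr's length never changes.
def Pre_update (arr : List Int) (queries : List (Int × Int)) : Prop :=
  ∀ q ∈ queries, PySem.Raise.InRange arr.length (q.1 - 1)
instance (arr : List Int) (queries : List (Int × Int)) : Decidable (Pre_update arr queries) := by
  unfold Pre_update; infer_instance

def pvWitness_update : List Int × (List (Int × Int)) := ([1, 2, 2], [(1, 2), (3, 1), (-1, 7)])

def Spec_update (arr : List Int) (queries : List (Int × Int)) (out : List (List (Int × Int))) : Prop := out = update_alt arr queries
instance (arr : List Int) (queries : List (Int × Int)) (out : List (List (Int × Int))) : Decidable (Spec_update arr queries out) := by unfold Spec_update; infer_instance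

-- ===== CLAIM (what is proved, stated in full; the proofs are below) =====
def Claim_equal_update : Prop := ∀ (arr : List Int) (queries : List (Int × Int)), Dom_update arr queries → Pre_update arr queries → Spec_update arr queries (update arr queries)

-- ===== LEMMAS AND PROOFS =====

-- `bk` is the first key of K with maximal count under c (count c bk = bc)
def BestAt (K : List Int) (c : Int → Int) (bk bc : Int) : Prop :=
  ∃ K1 K2, K = K1 ++ bk :: K2 ∧ c bk = bc ∧ (∀ k ∈ K1, c k < bc) ∧ (∀ k ∈ K2, c k ≤ bc)

-- the invariant tying B's extra state (order, bk, bc) to the shared dict cnt and array a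
def KInv (cnt ordd : PySem.Dict Int Int) (bk bc : Int) (a : List Int) : Prop :=
  cnt.keys.Nodup ∧
  (∀ x ∈ a, x ∈ cnt.keys) ∧
  ordd.keys = cnt.keys ∧
  (∀ k ∈ cnt.keys, ordd.getD k 0 = (cnt.keys.idxOf k : Int)) ∧
  BestAt cnt.keys (fun k => cnt.getD k 0) bk bc

-- ---- facts about the first-max scan ----

theorem fm_all_le (p : Int × Int) (l : List (Int × Int)) (h : ∀ r ∈ l, r.2 ≤ p.2) :
    l.foldl fmStep p = p := by
  induction l with
  | nil => rfl
  | cons r l ih =>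
      have hr : ¬ p.2 < r.2 := not_lt.mpr (h r (by simp))
      simp only [List.foldl_cons, fmStep, if_neg hr]
      exact ih (fun s hs => h s (by simp [hs]))

theorem fm_big (q : Int × Int) (xs ys : List (Int × Int)) :
    ∀ p, p.2 < q.2 → (∀ r ∈ xs, r.2 < q.2) → (∀ r ∈ ys, r.2 ≤ q.2) →
    (xs ++ q :: ys).foldl fmStep p = q := by
  induction xs with
  | nil =>
      intro p hp _ hys
      simp only [List.nil_append, List.foldl_cons, fmStep, if_pos hp]
      exact fm_all_le q ys hys
  | cons x xs ih =>
      intro p hp hxs hys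
      simp only [List.cons_append, List.foldl_cons]
      have hx : x.2 < q.2 := hxs x (by simp)
      have : (fmStep p x).2 < q.2 := by
        simp only [fmStep]; split <;> [exact hx; exact hp]
      exact ih _ this (fun r hr => hxs r (by simp [hr])) hys

theorem fmList_eq (l xs ys : List (Int × Int)) (q : Int × Int)
    (hl : l = xs ++ q :: ys) (hxs : ∀ r ∈ xs, r.2 < q.2) (hys : ∀ r ∈ ys, r.2 ≤ q.2) :
    fmList l = [q] := by
  subst hl
  cases xs with
  | nil => simp only [List.nil_append, fmList, fm_all_le q ys hys]
  | cons x xs =>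
      simp only [List.cons_append, fmList]
      rw [fm_big q xs ys x (hxs x (by simp)) (fun r hr => hxs r (by simp [hr])) hys]

theorem fm_decomp (l : List (Int × Int)) :
    ∀ p, ∃ xs ys, p :: l = xs ++ (l.foldl fmStep p) :: ys ∧
      (∀ r ∈ xs, r.2 < (l.foldl fmStep p).2) ∧ (∀ r ∈ ys, r.2 ≤ (l.foldl fmStep p).2) := by
  induction l with
  | nil => intro p; exact ⟨[], [], by simp, by simp, by simp⟩
  | cons r l ih =>
      intro p
      simp only [List.foldl_cons]
      obtain ⟨xs, ys, he, hlt, hle⟩ := ih (fmStep p r)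
      have hres : (fmStep p r).2 ≤ (l.foldl fmStep (fmStep p r)).2 := by
        cases xs with
        | nil =>
            have : fmStep p r = l.foldl fmStep (fmStep p r) := by
              have := he; simpa using congrArg (fun t => t.headI) this
            rw [← this]
        | cons h t =>
            have hh : fmStep p r = h := by
              have := congrArg (fun t => t.headI) he; simpa using this
            exact le_of_lt (hh ▸ hlt h (by simp))
      by_cases hpr : p.2 < r.2
      · simp only [fmStep, if_pos hpr] at he hlt hle hres ⊢
        refine ⟨p :: xs, ys, by simpa using congrArg (List.cons p) he, ?_, hle⟩
        intro s hs
        rcases List.mem_cons.mp hs with h | h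
        · subst h; exact lt_of_lt_of_le hpr hres
        · exact hlt s h
      · simp only [fmStep, if_neg hpr] at he hlt hle hres ⊢
        cases xs with
        | nil =>
            simp only [List.nil_append] at he
            have hp : l.foldl fmStep p = p := by
              have := congrArg (fun t => t.headI) he; simpa using this.symm
            have hys : ys = l := by
              have := congrArg List.tail he; simpa [hp] using this.symm
            refine ⟨[], r :: l, by simp [hp], by simp, ?_⟩
            intro s hs
            rcases List.mem_cons.mp hs with h | h
            · subst h; rw [hp]; exact not_lt.mp hpr
            · rw [hp]; rw [hp] at hle; exact hle s (hys ▸ h)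
        | cons h t =>
            have hh : h = p := by
              have := congrArg (fun t => t.headI) he; simpa using this.symm
            have ht : l = t ++ (l.foldl fmStep p) :: ys := by
              have := congrArg List.tail he; simpa [hh] using this
            refine ⟨p :: r :: t, ys, by simpa using congrArg (fun s => p :: r :: s) ht, ?_, hle⟩
            intro s hs
            have hp2 : p.2 < (l.foldl fmStep p).2 := hh ▸ hlt h (by simp)
            rcases List.mem_cons.mp hs with h1 | h1
            · subst h1; exact hp2
            rcases List.mem_cons.mp h1 with h2 | h2
            · subst h2; exact lt_of_le_of_lt (not_lt.mp hpr) hp2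
            · exact hlt s (by simp [hh, h2])

-- ---- BestAt lemmas ----

theorem bestAt_le {K : List Int} {c : Int → Int} {bk bc : Int} (h : BestAt K c bk bc) :
    ∀ k ∈ K, c k ≤ bc := by
  obtain ⟨K1, K2, hK, hcb, hlt, hle⟩ := h
  intro k hk; rw [hK] at hk
  rcases List.mem_append.mp hk with h1 | h1
  · exact le_of_lt (hlt k h1)
  rcases List.mem_cons.mp h1 with h2 | h2
  · subst h2; exact le_of_eq hcb
  · exact hle k h2

theorem bestAt_mem {K : List Int} {c : Int → Int} {bk bc : Int} (h : BestAt K c bk bc) :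
    bk ∈ K := by
  obtain ⟨K1, K2, hK, _⟩ := h; rw [hK]; simp

theorem bestAt_count {K : List Int} {c : Int → Int} {bk bc : Int} (h : BestAt K c bk bc) :
    c bk = bc := by
  obtain ⟨K1, K2, hK, hcb, _⟩ := h; exact hcb

theorem fmList_of_bestAt {K : List Int} {c : Int → Int} {bk bc : Int} (h : BestAt K c bk bc) :
    fmList (K.map (fun k => (k, c k))) = [(bk, bc)] := by
  obtain ⟨K1, K2, hK, hcb, hlt, hle⟩ := h
  apply fmList_eq _ (K1.map (fun k => (k, c k))) (K2.map (fun k => (k, c k))) (bk, bc)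
  · rw [hK]; simp [hcb]
  · intro r hr
    obtain ⟨k, hk, hr2⟩ := List.mem_map.mp hr
    rw [← hr2]; exact hlt k hk
  · intro r hr
    obtain ⟨k, hk, hr2⟩ := List.mem_map.mp hr
    rw [← hr2]; exact hle k hk

theorem bestAt_of_fmList (K : List Int) (c : Int → Int) (hK : K ≠ []) :
    ∃ bk bc, fmList (K.map (fun k => (k, c k))) = [(bk, bc)] ∧ BestAt K c bk bc := by
  cases K with
  | nil => exact absurd rfl hK
  | cons k0 K' =>
      obtain ⟨xs, ys, he, hlt, hle⟩ := fm_decomp (K'.map (fun k => (k, c k))) (k0, c k0)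
      have hmap : (k0 :: K').map (fun k => (k, c k))
          = xs ++ ((K'.map (fun k => (k, c k))).foldl fmStep (k0, c k0)) :: ys := by
        simpa using he
      obtain ⟨K1, K2', hKsplit, hm1, hm2⟩ := List.map_eq_append_iff.mp hmap
      obtain ⟨k, K2, hsplit2, hqk, hm3⟩ := List.map_eq_cons_iff.mp hm2
      refine ⟨k, c k, ?_, K1, K2, by rw [hKsplit, hsplit2], rfl, ?_, ?_⟩
      · have h1 : fmList ((k0 :: K').map (fun k => (k, c k)))
            = [(K'.map (fun k => (k, c k))).foldl fmStep (k0, c k0)] := by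
          simp [fmList]
        rw [h1, ← hqk]
      · intro j hj
        have : (j, c j) ∈ xs := by rw [← hm1]; exact List.mem_map_of_mem hj
        have := hlt _ this
        rw [← hqk] at this; exact this
      · intro j hj
        have : (j, c j) ∈ ys := by rw [← hm3]; exact List.mem_map_of_mem hj
        have := hle _ this
        rw [← hqk] at this; exact this

-- ---- small dictionary / index facts ----

theorem modify_eq_insert (d : PySem.Dict Int Int) (k : Int) (d0 : Int) (f : Int → Int) :
    d.modify k d0 f = d.insert k (f (d.getD k d0)) := rfl

theorem keys_length_size (d : PySem.Dict Int Int) : d.keys.length = d.size := by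
  simp [PySem.Dict.keys, PySem.Dict.size]

theorem contains_true_iff (d : PySem.Dict Int Int) (k : Int) :
    d.contains k = true ↔ k ∈ d.keys := by
  rw [PySem.Dict.contains_eq_decide_mem_keys]; simp

theorem contains_false_iff (d : PySem.Dict Int Int) (k : Int) :
    d.contains k = false ↔ k ∉ d.keys := by
  rw [PySem.Dict.contains_eq_decide_mem_keys]; simp

theorem mem_pySetD (a : List Int) (j : Int) (w x : Int)
    (hx : x ∈ PySem.List.pySetD a j w) : x = w ∨ x ∈ a := by
  unfold PySem.List.pySetD PySem.List.pySet? at hx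
  cases h : PySem.List.pyIdx? a.length j with
  | none => rw [h] at hx; simp at hx; exact Or.inr hx
  | some k =>
      rw [h] at hx; simp at hx
      rcases List.mem_or_eq_of_mem_set hx with h1 | h1
      · exact Or.inr h1
      · exact Or.inl h1

theorem insert_getD_self (d : PySem.Dict Int Int) (k : Int)
    (hnd : d.keys.Nodup) (hc : d.contains k = true) :
    d.insert k (d.getD k 0) = d := by
  apply PySem.Dict.ext
  rw [PySem.Dict.items_insert_of_contains d _ hc]
  rw [PySem.Dict.items_eq_map_keys d hnd 0, List.map_map]
  apply List.map_congr_left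
  intro j hj
  by_cases hjk : j = k
  · subst hjk; simp
  · simp [Function.comp, hjk]

theorem fmList_firstMax (d : PySem.Dict Int Int) (h : d.items ≠ []) :
    fmList d.items = [firstMax d] := by
  unfold fmList firstMax
  cases hi : d.items with
  | nil => exact absurd hi h
  | cons p rest => rfl

theorem idxOf_decomp (K1 K2 : List Int) (k : Int) (h : (K1 ++ k :: K2).Nodup) :
    (K1 ++ k :: K2).idxOf k = K1.length := by
  have hk1 : k ∉ K1 := by
    intro hmem
    exact (List.disjoint_of_nodup_append h) hmem (by simp)
  rw [List.idxOf_append_of_notMem hk1, List.idxOf_cons_self]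
  omega

theorem mem_prefix_of_idxOf_lt (K1 K2 : List Int) (bk k : Int)
    (h : (K1 ++ bk :: K2).idxOf k < K1.length) : k ∈ K1 := by
  by_contra h1
  rw [List.idxOf_append_of_notMem h1] at h; omega

theorem idxOf_lt_of_mem_prefix (K1 K2 : List Int) (bk k : Int) (hk : k ∈ K1) :
    (K1 ++ bk :: K2).idxOf k < K1.length := by
  rw [List.idxOf_append_of_mem hk]; exact List.idxOf_lt_length_of_mem hk

-- the `order` dict update of B (no-op for known keys, append a fresh index otherwise)
theorem ordExtend (o : PySem.Dict Int Int) (K : List Int) (x : Int)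
    (hnd : K.Nodup) (hk : o.keys = K) (hidx : ∀ k ∈ K, o.getD k 0 = (K.idxOf k : Int)) :
    (if o.contains x then o else o.insert x (o.size : Int)).keys
        = (if x ∈ K then K else K ++ [x]) ∧
    (∀ k ∈ (if x ∈ K then K else K ++ [x]),
        (if o.contains x then o else o.insert x (o.size : Int)).getD k 0
          = ((if x ∈ K then K else K ++ [x]).idxOf k : Int)) ∧
    (if x ∈ K then K else K ++ [x]).Nodup := by
  by_cases hx : x ∈ K
  · have hc : o.contains x = true := (contains_true_iff o x).mpr (by rw [hk]; exact hx)
    simp only [hc, hx, if_pos]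
    exact ⟨hk, hidx, hnd⟩
  · have hc : o.contains x = false := (contains_false_iff o x).mpr (by rw [hk]; exact hx)
    simp only [hc, hx, if_neg, Bool.false_eq_true, not_false_eq_true]
    refine ⟨?_, ?_, ?_⟩
    · rw [PySem.Dict.keys_insert_of_not_contains o _ hc, hk]
    · intro k hkm
      rcases List.mem_append.mp hkm with h1 | h1
      · have hne : k ≠ x := fun he => hx (he ▸ h1)
        rw [PySem.Dict.getD_insert, if_neg hne, hidx k h1, List.idxOf_append_of_mem h1]
      · have hkx : k = x := by simpa using h1
        subst hkx
        rw [PySem.Dict.getD_insert, if_pos rfl,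
            List.idxOf_append_of_notMem hx, List.idxOf_cons_self]
        have : o.size = K.length := by rw [← keys_length_size, hk]
        simp [this]
    · simp only [List.nodup_append]
      refine ⟨hnd, by simp, ?_⟩
      intro a ha b hb
      have hbx : b = x := by simpa using hb
      intro he
      exact hx (hbx ▸ he ▸ ha)

-- ---- the per-query step: A and B stay in lock-step and KInv is preserved ----

theorem step_eq (a : List Int) (cnt ordd : PySem.Dict Int Int) (bk bc : Int)
    (res : List (List (Int × Int))) (i v : Int)
    (hR : PySem.Raise.InRange a.length (i - 1))
    (hI : KInv cnt ordd bk bc a) :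
    ∃ cnt' ordd' bk' bc',
      updateStepA (a, cnt, res) (i, v)
        = (PySem.List.pySetD a (i - 1) v, cnt', res ++ [[(bk', bc')]]) ∧
      updateStepB (a, cnt, ordd, bk, bc, res) (i, v)
        = (PySem.List.pySetD a (i - 1) v, cnt', ordd', bk', bc', res ++ [[(bk', bc')]]) ∧
      KInv cnt' ordd' bk' bc' (PySem.List.pySetD a (i - 1) v) := by
  obtain ⟨hnd, hmem, hok, hoi, hbest⟩ := hI
  set p := PySem.List.pyGetD a (i - 1) 0 with hp
  set a1 := PySem.List.pySetD a (i - 1) v with ha1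
  have hpa : p ∈ a := PySem.List.pyGetD_mem a 0 hR
  have hpK : p ∈ cnt.keys := hmem p hpa
  have hcp : cnt.contains p = true := (contains_true_iff _ _).mpr hpK
  have hmem1 : ∀ x ∈ a1, x = v ∨ x ∈ a := fun x hx => mem_pySetD a (i - 1) v x hx
  by_cases hpv : p = v
  · -- prev == v : the counter is unchanged
    have hccnt : (cnt.insert p (cnt.getD p 0 - 1)).insert v
        ((cnt.insert p (cnt.getD p 0 - 1)).getD v 0 + 1) = cnt := by
      rw [← hpv, PySem.Dict.getD_insert_self, PySem.Dict.insert_insert_self]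
      have h1 : cnt.getD p 0 - 1 + 1 = cnt.getD p 0 := by ring
      rw [h1]
      exact insert_getD_self cnt p hnd hcp
    have hout : mostCommon1 cnt = [(bk, bc)] := by
      unfold mostCommon1
      rw [PySem.Dict.items_eq_map_keys cnt hnd 0]
      exact fmList_of_bestAt hbest
    refine ⟨cnt, ordd, bk, bc, ?_, ?_, ?_⟩
    · show (a1, (cnt.modify p 0 (· - 1)).modify v 0 (· + 1),
           res ++ [mostCommon1 ((cnt.modify p 0 (· - 1)).modify v 0 (· + 1))])
          = (a1, cnt, res ++ [[(bk, bc)]])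
      rw [modify_eq_insert, modify_eq_insert, hccnt, hout]
    · show (if p = v then (a1, cnt, ordd, bk, bc, res ++ [[(bk, bc)]]) else _)
          = (a1, cnt, ordd, bk, bc, res ++ [[(bk, bc)]])
      rw [if_pos hpv]
    · refine ⟨hnd, ?_, hok, hoi, hbest⟩
      intro x hx
      rcases hmem1 x hx with h1 | h1
      · subst h1; rw [← hpv]; exact hpK
      · exact hmem x h1
  · -- prev != v
    set K := cnt.keys with hK0
    set cnt1 := cnt.insert p (cnt.getD p 0 - 1) with hcnt1
    have hk1 : cnt1.keys = K := PySem.Dict.keys_insert_of_contains cnt _ hcp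
    have hc1 : ∀ k, cnt1.getD k 0 = if k = p then cnt.getD p 0 - 1 else cnt.getD k 0 := by
      intro k; rw [hcnt1, PySem.Dict.getD_insert]
    set cv := cnt1.getD v 0 + 1 with hcv0
    have hcv : cv = cnt.getD v 0 + 1 := by
      rw [hcv0, hc1, if_neg (fun h => hpv h.symm)]
    set cnt2 := cnt1.insert v cv with hcnt2
    set K' := if v ∈ K then K else K ++ [v] with hK'
    have hk2 : cnt2.keys = K' := by
      by_cases hv : v ∈ K
      · have : cnt1.contains v = true := (contains_true_iff _ _).mpr (by rw [hk1]; exact hv)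
        rw [hcnt2, PySem.Dict.keys_insert_of_contains cnt1 _ this, hk1, hK', if_pos hv]
      · have : cnt1.contains v = false := (contains_false_iff _ _).mpr (by rw [hk1]; exact hv)
        rw [hcnt2, PySem.Dict.keys_insert_of_not_contains cnt1 _ this, hk1, hK', if_neg hv]
    have hc2 : ∀ k, cnt2.getD k 0
        = if k = v then cv else if k = p then cnt.getD p 0 - 1 else cnt.getD k 0 := by
      intro k; rw [hcnt2, PySem.Dict.getD_insert, hc1]
    obtain ⟨hok1, hoi1, hndK'⟩ := ordExtend ordd K v hnd hok hoi
    set ordd1 := if ordd.contains v then ordd else ordd.insert v (ordd.size : Int) with hordd1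
    have hnd2 : cnt2.keys.Nodup := by rw [hk2]; exact hndK'
    have hvK' : v ∈ K' := by
      by_cases hv : v ∈ K <;> simp [hK', hv]
    have hsubK' : ∀ k ∈ K, k ∈ K' := by
      intro k hk
      by_cases hv : v ∈ K <;> simp [hK', hv, hk]
    have hK'mem : ∀ k ∈ K', k = v ∨ k ∈ K := by
      intro k hk
      by_cases hv : v ∈ K
      · rw [hK', if_pos hv] at hk; exact Or.inr hk
      · rw [hK', if_neg hv] at hk
        rcases List.mem_append.mp hk with h1 | h1
        · exact Or.inr h1
        · exact Or.inl (by simpa using h1)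
    have hbkK : bk ∈ K := bestAt_mem hbest
    have hble : ∀ k ∈ K, cnt.getD k 0 ≤ bc := bestAt_le hbest
    have hcbk : cnt.getD bk 0 = bc := bestAt_count (c := fun k => cnt.getD k 0) hbest
    have hov : ordd1.getD v 0 = (K'.idxOf v : Int) := hoi1 v hvK'
    have hobk : ordd1.getD bk 0 = (K'.idxOf bk : Int) := hoi1 bk (hsubK' bk hbkK)
    have hidxbk : K'.idxOf bk = K.idxOf bk := by
      by_cases hv : v ∈ K
      · rw [hK', if_pos hv]
      · rw [hK', if_neg hv, List.idxOf_append_of_mem hbkK]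
    -- counts never grow except at v
    have hdec : ∀ k, k ≠ v → cnt2.getD k 0 ≤ cnt.getD k 0 := by
      intro k hk
      rw [hc2, if_neg hk]
      split_ifs with h1
      · subst h1; omega
      · exact le_refl _
    have hc2v : cnt2.getD v 0 = cv := by rw [hc2, if_pos rfl]
    -- shared KInv re-assembly
    have mkInv : ∀ bk' bc', BestAt K' (fun k => cnt2.getD k 0) bk' bc' →
        KInv cnt2 ordd1 bk' bc' a1 := by
      intro bk' bc' hb
      refine ⟨hnd2, ?_, ?_, ?_, ?_⟩
      · intro x hx
        rcases hmem1 x hx with h1 | h1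
        · subst h1; rw [hk2]; exact hvK'
        · rw [hk2]; exact hsubK' x (hmem x h1)
      · rw [hok1, hk2]
      · rw [hk2]; exact hoi1
      · rw [hk2]; exact hb
    have hout2 : ∀ bk' bc', BestAt K' (fun k => cnt2.getD k 0) bk' bc' →
        mostCommon1 cnt2 = [(bk', bc')] := by
      intro bk' bc' hb
      unfold mostCommon1
      rw [PySem.Dict.items_eq_map_keys cnt2 hnd2 0, hk2]
      exact fmList_of_bestAt hb
    -- the A-side tuple, shared by all branches
    have hAeq : ∀ bk' bc', mostCommon1 cnt2 = [(bk', bc')] →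
        updateStepA (a, cnt, res) (i, v)
          = (a1, cnt2, res ++ [[(bk', bc')]]) := by
      intro bk' bc' hmc
      show (a1, (cnt.modify p 0 (· - 1)).modify v 0 (· + 1),
           res ++ [mostCommon1 ((cnt.modify p 0 (· - 1)).modify v 0 (· + 1))])
          = (a1, cnt2, res ++ [[(bk', bc')]])
      rw [modify_eq_insert, modify_eq_insert, ← hcnt1, ← hcv0, ← hcnt2, hmc]
    by_cases hC : bc < cv ∨ (cv = bc ∧ ordd1.getD v 0 < ordd1.getD bk 0)
    · -- new mode is (v, cv)
      obtain ⟨Kv1, Kv2, hKv⟩ := List.append_of_mem hvK'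
      have hndKv : (Kv1 ++ v :: Kv2).Nodup := hKv ▸ hndK'
      have hknotv : ∀ k, (k ∈ Kv1 ∨ k ∈ Kv2) → k ≠ v := by
        intro k hk he
        subst he
        rcases hk with h1 | h1
        · exact (List.disjoint_of_nodup_append hndKv) h1 (by simp)
        · exact (List.Nodup.notMem ((List.nodup_append.mp hndKv).2.1)) h1
      have hbb : BestAt K' (fun k => cnt2.getD k 0) v cv := by
        refine ⟨Kv1, Kv2, hKv, hc2v, ?_, ?_⟩
        · intro k hk
          show cnt2.getD k 0 < cv
          have hkv : k ≠ v := hknotv k (Or.inl hk)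
          have hkK : k ∈ K := by
            rcases hK'mem k (hKv ▸ (by simp [hk] : k ∈ Kv1 ++ v :: Kv2)) with h1 | h1
            · exact absurd h1 hkv
            · exact h1
          rcases hC with h1 | ⟨h1, h2⟩
          · calc cnt2.getD k 0 ≤ cnt.getD k 0 := hdec k hkv
              _ ≤ bc := hble k hkK
              _ < cv := h1
          · -- cv = bc and v comes before bk: everything before v is before bk, so strictly below bc
            have hvK : v ∈ K := by
              by_contra hvn
              have hKeq : K' = K ++ [v] := by rw [hK', if_neg hvn]
              have h3 : K'.idxOf v = K.length := by
                rw [hKeq, List.idxOf_append_of_notMem hvn, List.idxOf_cons_self]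
                omega
              have h4 : K.idxOf bk < K.length := List.idxOf_lt_length_of_mem hbkK
              rw [hov, hobk, hidxbk, h3] at h2
              exact absurd (by exact_mod_cast h2) (by omega)
            have hKeq : K' = K := by rw [hK', if_pos hvK]
            obtain ⟨B1, B2, hB⟩ := hbest
            have hidxv : K.idxOf v = Kv1.length := by
              rw [← hKeq, hKv]; exact idxOf_decomp Kv1 Kv2 v hndKv
            have hidxbk2 : K.idxOf bk = B1.length := by
              rw [hB.1] at hnd ⊢; exact idxOf_decomp B1 B2 bk hnd
            have hlt2 : Kv1.length < B1.length := by
              rw [hov, hobk, hidxbk, hKeq, hidxv, hidxbk2] at h2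
              exact_mod_cast h2
            have hkidx : K.idxOf k < Kv1.length := by
              rw [← hKeq, hKv]; exact idxOf_lt_of_mem_prefix Kv1 Kv2 v k hk
            have hkB1 : k ∈ B1 := by
              apply mem_prefix_of_idxOf_lt B1 B2 bk k
              rw [← hB.1]
              omega
            calc cnt2.getD k 0 ≤ cnt.getD k 0 := hdec k hkv
              _ < bc := hB.2.2.1 k hkB1
              _ = cv := h1.symm
        · intro k hk
          show cnt2.getD k 0 ≤ cv
          have hkv : k ≠ v := hknotv k (Or.inr hk)
          have hkK : k ∈ K := by
            rcases hK'mem k (hKv ▸ (by simp [hk] : k ∈ Kv1 ++ v :: Kv2)) with h1 | h1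
            · exact absurd h1 hkv
            · exact h1
          have h5 : cnt2.getD k 0 ≤ bc :=
            le_trans (hdec k hkv) (hble k hkK)
          rcases hC with h1 | ⟨h1, _⟩
          · omega
          · omega
      refine ⟨cnt2, ordd1, v, cv, hAeq v cv (hout2 v cv hbb), ?_, mkInv v cv hbb⟩
      show (if p = v then _ else _) = _
      rw [if_neg hpv]
      show (if bc < cv ∨ (cv = bc ∧ ordd1.getD v 0 < ordd1.getD bk 0) then
              (a1, cnt2, ordd1, v, cv, res ++ [[(v, cv)]])
            else _) = (a1, cnt2, ordd1, v, cv, res ++ [[(v, cv)]])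
      rw [if_pos hC]
    · by_cases hpbk : p = bk
      · -- the mode itself lost a count: rescan
        have hKne : K' ≠ [] := by
          intro h0
          have := hsubK' p hpK
          rw [h0] at this; exact (List.not_mem_nil).elim this
        obtain ⟨bk', bc', hfm, hba⟩ := bestAt_of_fmList K' (fun k => cnt2.getD k 0) hKne
        have hitems : cnt2.items ≠ [] := by
          intro h0
          rw [PySem.Dict.items_eq_map_keys cnt2 hnd2 0, hk2] at h0
          exact hKne (List.map_eq_nil_iff.mp h0)
        have hfm2 : fmList cnt2.items = [(bk', bc')] := by
          rw [PySem.Dict.items_eq_map_keys cnt2 hnd2 0, hk2]; exact hfm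
        have hfx : firstMax cnt2 = (bk', bc') := by
          have := fmList_firstMax cnt2 hitems
          rw [hfm2] at this
          simpa using this.symm
        refine ⟨cnt2, ordd1, bk', bc', hAeq bk' bc' (hout2 bk' bc' hba), ?_, mkInv bk' bc' hba⟩
        show (if p = v then _ else _) = _
        rw [if_neg hpv]
        show (if bc < cv ∨ (cv = bc ∧ ordd1.getD v 0 < ordd1.getD bk 0) then _
              else if p = bk then
                (a1, cnt2, ordd1, (firstMax cnt2).1, (firstMax cnt2).2, res ++ [[firstMax cnt2]])
              else _)
            = (a1, cnt2, ordd1, bk', bc', res ++ [[(bk', bc')]])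
        rw [if_neg hC, if_pos hpbk, hfx]
      · -- the mode is unaffected
        push_neg at hC
        have hvbk : v ≠ bk := by
          intro h
          have h6 : cnt.getD v 0 = bc := by rw [h]; exact hcbk
          have h7 : cv = bc + 1 := by rw [hcv, h6]
          omega
        obtain ⟨B1, B2, hB, hcb, hltB, hleB⟩ := hbest
        have hcvle : cv ≤ bc := by omega
        have hbb : BestAt K' (fun k => cnt2.getD k 0) bk bc := by
          have hc2bk : cnt2.getD bk 0 = bc := by
            rw [hc2, if_neg (fun h => hvbk h.symm), if_neg (fun h => hpbk h.symm)]
            exact hcbk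
          have hpre : ∀ k ∈ B1, cnt2.getD k 0 < bc := by
            intro k hk
            by_cases hkv : k = v
            · -- v sits before bk, so ¬C forces cv < bc
              have hvB1 : v ∈ B1 := hkv ▸ hk
              have hvK : v ∈ K := by rw [hB]; exact List.mem_append.mpr (Or.inl hvB1)
              have hKeq : K' = K := by rw [hK', if_pos hvK]
              have hidxbk2 : K.idxOf bk = B1.length := by
                rw [hB] at hnd ⊢; exact idxOf_decomp B1 B2 bk hnd
              have hidxv : K.idxOf v < B1.length := by
                rw [hB]; exact idxOf_lt_of_mem_prefix B1 B2 bk v hvB1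
              have hord : ordd1.getD v 0 < ordd1.getD bk 0 := by
                rw [hov, hobk, hidxbk, hKeq, hidxbk2]
                exact_mod_cast hidxv
              have hcvne : cv ≠ bc := fun he => absurd hord (not_lt.mpr (by
                have := hC.2 he; omega))
              rw [hkv, hc2v]; omega
            · calc cnt2.getD k 0 ≤ cnt.getD k 0 := hdec k hkv
                _ < bc := hltB k hk
          by_cases hv : v ∈ K
          · have hKeq : K' = K := by rw [hK', if_pos hv]
            refine ⟨B1, B2, by rw [hKeq, hB], hc2bk, hpre, ?_⟩
            intro k hk
            show cnt2.getD k 0 ≤ bc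
            by_cases hkv : k = v
            · rw [hkv, hc2v]; exact hcvle
            · exact le_trans (hdec k hkv) (hleB k hk)
          · have hKeq : K' = B1 ++ bk :: (B2 ++ [v]) := by
              rw [hK', if_neg hv, hB]; simp
            refine ⟨B1, B2 ++ [v], hKeq, hc2bk, hpre, ?_⟩
            intro k hk
            show cnt2.getD k 0 ≤ bc
            rcases List.mem_append.mp hk with h1 | h1
            · have hkv : k ≠ v := by
                intro he; exact hv (by rw [hB]; simp [he ▸ h1])
              exact le_trans (hdec k hkv) (hleB k h1)
            · have hkv : k = v := by simpa using h1
              rw [hkv, hc2v]; exact hcvle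
        refine ⟨cnt2, ordd1, bk, bc, hAeq bk bc (hout2 bk bc hbb), ?_, mkInv bk bc hbb⟩
        show (if p = v then _ else _) = _
        rw [if_neg hpv]
        show (if bc < cv ∨ (cv = bc ∧ ordd1.getD v 0 < ordd1.getD bk 0) then _
              else if p = bk then _
              else (a1, cnt2, ordd1, bk, bc, res ++ [[(bk, bc)]]))
            = (a1, cnt2, ordd1, bk, bc, res ++ [[(bk, bc)]])
        have hC' : ¬ (bc < cv ∨ (cv = bc ∧ ordd1.getD v 0 < ordd1.getD bk 0)) := by
          push_neg
          exact hC
        rw [if_neg hC', if_neg hpbk]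

-- ---- the query loop ----

theorem loop_eq : ∀ (qs : List (Int × Int)) (a : List Int)
    (cnt ordd : PySem.Dict Int Int) (bk bc : Int) (res : List (List (Int × Int))),
    (∀ q ∈ qs, PySem.Raise.InRange a.length (q.1 - 1)) →
    KInv cnt ordd bk bc a →
    (qs.foldl updateStepA (a, cnt, res)).2.2 =
      (qs.foldl updateStepB (a, cnt, ordd, bk, bc, res)).2.2.2.2.2 := by
  intro qs
  induction qs with
  | nil => intros; rfl
  | cons q qs ih =>
      intro a cnt ordd bk bc res hR hI
      obtain ⟨i, v⟩ := q
      obtain ⟨cnt', ordd', bk', bc', hA, hB, hI'⟩ :=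
        step_eq a cnt ordd bk bc res i v (hR (i, v) (by simp)) hI
      simp only [List.foldl_cons]
      rw [hA, hB]
      exact ih _ _ _ _ _ _
        (fun q' hq' => by
          rw [PySem.List.length_pySetD]
          exact hR q' (List.mem_cons_of_mem _ hq'))
        hI'

-- ---- initialisation ----

theorem init_inv : ∀ (xs : List Int) (d o : PySem.Dict Int Int),
    d.keys.Nodup → o.keys = d.keys →
    (∀ k ∈ d.keys, o.getD k 0 = (d.keys.idxOf k : Int)) →
    (∀ k, k ∈ d.keys ∨ k ∈ xs →
        k ∈ (xs.foldl (fun d x => d.insert x (d.getD x 0 + 1)) d).keys) ∧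
    (xs.foldl (fun d x => d.insert x (d.getD x 0 + 1)) d).keys.Nodup ∧
    (xs.foldl (fun o x => if o.contains x then o else o.insert x (o.size : Int)) o).keys
      = (xs.foldl (fun d x => d.insert x (d.getD x 0 + 1)) d).keys ∧
    (∀ k ∈ (xs.foldl (fun d x => d.insert x (d.getD x 0 + 1)) d).keys,
        (xs.foldl (fun o x => if o.contains x then o else o.insert x (o.size : Int)) o).getD k 0
          = ((xs.foldl (fun d x => d.insert x (d.getD x 0 + 1)) d).keys.idxOf k : Int)) := by
  intro xs
  induction xs with
  | nil =>
      intro d o hnd hko hio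
      exact ⟨fun k hk => by simpa using hk, hnd, hko, hio⟩
  | cons x xs ih =>
      intro d o hnd hko hio
      obtain ⟨hke, hie, hnde⟩ := ordExtend o d.keys x hnd hko hio
      set K1 := if x ∈ d.keys then d.keys else d.keys ++ [x] with hK1
      have hxK1 : x ∈ K1 := by by_cases hv : x ∈ d.keys <;> simp [hK1, hv]
      have hsub : ∀ k ∈ d.keys, k ∈ K1 := by
        intro k hk; by_cases hv : x ∈ d.keys <;> simp [hK1, hv, hk]
      have hdk : (d.insert x (d.getD x 0 + 1)).keys = K1 := by
        by_cases hv : x ∈ d.keys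
        · rw [PySem.Dict.keys_insert_of_contains d _ ((contains_true_iff _ _).mpr hv),
              hK1, if_pos hv]
        · rw [PySem.Dict.keys_insert_of_not_contains d _ ((contains_false_iff _ _).mpr hv),
              hK1, if_neg hv]
      simp only [List.foldl_cons]
      obtain ⟨m1, m2, m3, m4⟩ := ih (d.insert x (d.getD x 0 + 1))
        (if o.contains x then o else o.insert x (o.size : Int))
        (by rw [hdk]; exact hnde) (by rw [hdk, hke]) (by rw [hdk]; exact hie)
      refine ⟨?_, m2, m3, m4⟩
      intro k hk
      rcases hk with h1 | h1
      · exact m1 k (Or.inl (by rw [hdk]; exact hsub k h1))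
      · rcases List.mem_cons.mp h1 with h2 | h2
        · subst h2; exact m1 k (Or.inl (by rw [hdk]; exact hxK1))
        · exact m1 k (Or.inr h2)

-- ===== VERDICT (by name: the statement is the Claim_ definition above) =====

theorem update_spec : Claim_equal_update := by
  unfold Claim_equal_update Spec_update
  intro arr queries _ hpre
  unfold Pre_update at hpre
  by_cases harr : arr = []
  · subst harr
    cases queries with
    | nil => rfl
    | cons q qs =>
        have := hpre q (by simp)
        simp [PySem.Raise.InRange] at this
        omega
  · have hsplit : altInit arr
        = (arr.foldl (fun d x => d.insert x (d.getD x 0 + 1))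
             (PySem.Dict.empty : PySem.Dict Int Int),
           arr.foldl (fun o x => if o.contains x then o else o.insert x (o.size : Int))
             (PySem.Dict.empty : PySem.Dict Int Int)) := by
      unfold altInit
      exact PySem.List.foldl_prod_mk
        (fun (d : PySem.Dict Int Int) (x : Int) => d.insert x (d.getD x 0 + 1))
        (fun (o : PySem.Dict Int Int) (x : Int) =>
          if o.contains x then o else o.insert x (o.size : Int))
        arr PySem.Dict.empty PySem.Dict.empty
    have hempty_keys : (PySem.Dict.empty : PySem.Dict Int Int).keys = [] := rfl
    obtain ⟨m1, m2, m3, m4⟩ :=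
      init_inv arr PySem.Dict.empty PySem.Dict.empty
        (by rw [hempty_keys]; exact List.nodup_nil) rfl
        (by rw [hempty_keys]; intro k hk; exact absurd hk List.not_mem_nil)
    set cnt0 := arr.foldl (fun d x => d.insert x (d.getD x 0 + 1))
        (PySem.Dict.empty : PySem.Dict Int Int) with hcnt0
    set ord0 := arr.foldl (fun o x => if o.contains x then o else o.insert x (o.size : Int))
        (PySem.Dict.empty : PySem.Dict Int Int) with hord0
    have hmem0 : ∀ x ∈ arr, x ∈ cnt0.keys := by
      intro x hx
      exact m1 x (Or.inr hx)
    have hKne : cnt0.keys ≠ [] := by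
      intro h0
      cases arr with
      | nil => exact harr rfl
      | cons y ys =>
          have := hmem0 y (by simp)
          rw [h0] at this; exact List.not_mem_nil this
    obtain ⟨bk0, bc0, hfm, hba⟩ := bestAt_of_fmList cnt0.keys (fun k => cnt0.getD k 0) hKne
    have hitems : cnt0.items ≠ [] := by
      intro h0
      rw [PySem.Dict.items_eq_map_keys cnt0 m2 0] at h0
      exact hKne (List.map_eq_nil_iff.mp h0)
    have hfm2 : fmList cnt0.items = [(bk0, bc0)] := by
      rw [PySem.Dict.items_eq_map_keys cnt0 m2 0]; exact hfm
    have hfx : firstMax cnt0 = (bk0, bc0) := by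
      have := fmList_firstMax cnt0 hitems
      rw [hfm2] at this
      simpa using this.symm
    have hI0 : KInv cnt0 ord0 bk0 bc0 arr := ⟨m2, hmem0, m3, m4, hba⟩
    have hcntA : PySem.Dict.counter arr = cnt0 :=
      (PySem.Dict.foldl_insert_getD_add_one_eq_counter arr).symm
    show (queries.foldl updateStepA (arr, PySem.Dict.counter arr, [])).2.2
        = ((queries.foldl updateStepB
            (arr, (altInit arr).1, (altInit arr).2,
             (firstMax (altInit arr).1).1, (firstMax (altInit arr).1).2, [])).2.2.2.2.2)
    rw [hcntA, hsplit, hfx]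
    exact loop_eq queries arr cnt0 ord0 bk0 bc0 [] hpre hI0
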